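-- pv_equiv track=rewrite | github.com/fkutzner/PyCSCL | examples/sudoku.py | __parse_valid_board
-- ===== SOURCE A (Python) =====
-- def __parse_valid_board(sanitized_lines):
--     board_size = len(sanitized_lines[0])
--     board = []
--     for line in sanitized_lines:
--         board_row = []
--         for char in line:
--             if char == 'x':
--                 board_row.append(None)
--             elif char.isdigit():
--                 digit = int(char)
--                 if digit == 0 or digit > board_size:
--                     return None
--                 board_row.append(digit)
--             else:
--                 return None  # illegal character
--         board.append(board_row)
--     return board
-- ===== SOURCE B (Python) =====
-- def __parse_valid_board(sanitized_lines):
--     board_size = len(sanitized_lines[0])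
--     # Precompute the legal-cell table once: 'x' -> None, '1'..str(min(board_size, 9)) -> value.
--     table = {'x': None}
--     for d in range(1, min(board_size, 9) + 1):
--         table[str(d)] = d
--     # Stage 1: validate every character against the table; stage 2: translate via lookups.
--     if all(c in table for line in sanitized_lines for c in line):
--         return [[table[c] for c in line] for line in sanitized_lines]
--     return None
-- ===== Notes on version B (the rewrite author's own statement) =====
-- stated objective: alternative
-- what changed: Instead of classifying each character arithmetically inside one short-circuiting nested loop, B precomputes a lookup table of all legal cell characters ('x' plus the in-range digit strings) once, then runs two staged passes: a validation pass checking every character is a table key, and a translation pass mapping each character through the table.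
import Mathlib
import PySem

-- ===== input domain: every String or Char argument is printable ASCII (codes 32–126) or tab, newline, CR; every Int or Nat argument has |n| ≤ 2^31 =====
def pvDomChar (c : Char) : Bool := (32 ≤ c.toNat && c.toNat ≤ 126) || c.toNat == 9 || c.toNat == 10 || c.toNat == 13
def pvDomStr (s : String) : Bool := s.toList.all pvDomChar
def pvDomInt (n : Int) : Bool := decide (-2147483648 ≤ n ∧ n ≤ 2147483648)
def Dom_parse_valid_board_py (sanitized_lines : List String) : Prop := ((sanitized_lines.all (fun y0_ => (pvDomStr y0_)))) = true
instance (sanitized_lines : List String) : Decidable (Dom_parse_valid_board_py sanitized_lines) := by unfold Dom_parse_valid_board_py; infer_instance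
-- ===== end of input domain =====

-- B replaces A's single short-circuiting nested loop (arithmetic checks per cell)
-- by a precomputed lookup table of the legal cell characters plus two staged
-- passes (validate all characters, then translate by table lookup); same cost.

-- ===== PORT A =====
-- inner loop of A over the characters of one line; acc is board_row
-- (int(char) on a single ASCII digit char is exactly c.toNat - 48)
def pvRowA (board_size : Int) (cs : List Char) (acc : List (Option Int)) :
    Option (List (Option Int)) :=
  match cs with
  | [] => some acc
  | c :: rest =>
    if c = 'x' then pvRowA board_size rest (acc ++ [none])
    else if PySem.Chars.isdigit c then
      let digit : Int := (c.toNat : Int) - 48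
      if digit = 0 ∨ digit > board_size then none
      else pvRowA board_size rest (acc ++ [some digit])
    else none

-- outer loop of A over the lines; acc is board
def pvBoardA (board_size : Int) (lines : List String) (acc : List (List (Option Int))) :
    Option (List (List (Option Int))) :=
  match lines with
  | [] => some acc
  | l :: rest =>
    match pvRowA board_size l.toList [] with
    | none => none
    | some row => pvBoardA board_size rest (acc ++ [row])

def parse_valid_board_py (sanitized_lines : List String) : Option (List (List (Option Int))) :=
  match PySem.List.pyGet? sanitized_lines 0 with
  | none => none   -- sanitized_lines[0] raises IndexError: excluded by Pre_
  | some l0 =>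
    let board_size : Int := (l0.toList.length : Int)
    pvBoardA board_size sanitized_lines []

-- ===== PORT B =====
-- B's table-building loop: {'x': None} then table[str(d)] = d for d in range(1, min(board_size,9)+1).
-- str(d) for 1 ≤ d ≤ 9 is the single character chr(48+d), ported as that Char key (exact there).
def pvTableB (board_size : Int) : PySem.Dict Char (Option Int) :=
  (PySem.List.pyRange 1 (min board_size 9 + 1) 1).foldl
    (fun t d => t.insert (Char.ofNat (48 + d.toNat)) (some d))
    (PySem.Dict.insert PySem.Dict.empty 'x' none)

def parse_valid_board_py_alt (sanitized_lines : List String) : Option (List (List (Option Int))) :=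
  match PySem.List.pyGet? sanitized_lines 0 with
  | none => none   -- sanitized_lines[0] raises IndexError: excluded by Pre_
  | some l0 =>
    let board_size : Int := (l0.toList.length : Int)
    let table := pvTableB board_size
    if sanitized_lines.all (fun line => line.toList.all (fun c => table.contains c))
    then some (sanitized_lines.map (fun line =>
           -- table[c]: a KeyError is impossible after the all-pass, so getD's default is unreachable
           line.toList.map (fun c => (table.get? c).getD none)))
    else none

-- ===== PRECONDITION & SPEC =====
-- Pre_ excludes only the empty list, on which A raises IndexError (sanitized_lines[0]).
def Pre_parse_valid_board_py (sanitized_lines : List String) : Prop := sanitized_lines ≠ []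
instance (sanitized_lines : List String) : Decidable (Pre_parse_valid_board_py sanitized_lines) := by
  unfold Pre_parse_valid_board_py; infer_instance

def pvWitness_parse_valid_board_py : List String := ["1x", "x2"]

def Spec_parse_valid_board_py (sanitized_lines : List String) (out : Option (List (List (Option Int)))) : Prop := out = parse_valid_board_py_alt sanitized_lines
instance (sanitized_lines : List String) (out : Option (List (List (Option Int)))) : Decidable (Spec_parse_valid_board_py sanitized_lines out) := by unfold Spec_parse_valid_board_py; infer_instance

-- ===== CLAIM (what is proved, stated in full; the proofs are below) =====
def Claim_equal_parse_valid_board_py : Prop := ∀ (sanitized_lines : List String), Dom_parse_valid_board_py sanitized_lines → Pre_parse_valid_board_py sanitized_lines → Spec_parse_valid_board_py sanitized_lines (parse_valid_board_py sanitized_lines)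

-- ===== LEMMAS AND PROOFS =====

theorem chr_toNat (k : Nat) (h : k ≤ 8) : (Char.ofNat (49 + k)).toNat = 49 + k := by
  have hv : Nat.isValidChar (49+k) := Or.inl (by omega)
  simp [Char.ofNat, hv, Char.toNat, Char.ofNatAux]
  omega

theorem char_eq_iff_toNat (c d : Char) : c = d ↔ c.toNat = d.toNat :=
  ⟨fun h => by rw [h], fun h => Char.ext (UInt32.toNat_inj.mp h)⟩

-- B's table-building loop, characterised for the first k inserted digits
theorem tbl (k : Nat) (hk : k ≤ 9) (c : Char) :
    ((PySem.List.pyRange 1 ((k:Int)+1) 1).foldl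
      (fun t d => t.insert (Char.ofNat (48 + d.toNat)) (some d))
      (PySem.Dict.insert PySem.Dict.empty 'x' none)).get? c
    = if c = 'x' then some none
      else if 49 ≤ c.toNat ∧ (c.toNat : Int) ≤ 48 + k then some (some ((c.toNat : Int) - 48))
      else none := by
  induction k with
  | zero =>
    rw [show ((0:Nat):Int)+1 = 1 by norm_num, PySem.List.pyRange_one_eq_nil (by norm_num)]
    simp only [List.foldl_nil, PySem.Dict.get?_insert, PySem.Dict.get?_empty]
    split
    · rfl
    · rw [if_neg (by push_cast; omega)]
  | succ k ih =>
    have h1 : ((k+1:Nat):Int)+1 = ((k:Int)+1)+1 := by push_cast; ring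
    rw [h1, PySem.List.pyRange_one_succ_right (by omega), List.foldl_append]
    simp only [List.foldl_cons, List.foldl_nil, PySem.Dict.get?_insert]
    have htn : ((k:Int)+1).toNat = k + 1 := by omega
    rw [htn]
    have hch : (Char.ofNat (48 + (k+1))).toNat = 49 + k := by
      rw [show 48 + (k+1) = 49 + k by ring]; exact chr_toNat k (by omega)
    by_cases hx : c = 'x'
    · subst hx
      have hne : ('x' : Char) ≠ Char.ofNat (48 + (k+1)) := by
        intro h
        have h120 : ('x' : Char).toNat = 49 + k := by rw [h]; exact hch
        have : ('x' : Char).toNat = 120 := rfl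
        omega
      rw [if_neg hne, ih (by omega), if_pos rfl, if_pos rfl]
    · rw [if_neg hx]
      by_cases he : c = Char.ofNat (48 + (k+1))
      · have hcn : c.toNat = 49 + k := by rw [he]; exact hch
        rw [if_pos he,
          if_pos (show 49 ≤ c.toNat ∧ (c.toNat : Int) ≤ 48 + ((k+1:Nat):Int) by push_cast; omega)]
        rw [hcn]; push_cast; ring_nf
      · have hcn : c.toNat ≠ 49 + k := by
          intro h; exact he ((char_eq_iff_toNat c _).mpr (by rw [h, hch]))
        rw [if_neg he, ih (by omega), if_neg hx]
        by_cases h2 : 49 ≤ c.toNat ∧ (c.toNat : Int) ≤ 48 + (k:Int)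
        · rw [if_pos h2,
            if_pos (show 49 ≤ c.toNat ∧ (c.toNat : Int) ≤ 48 + ((k+1:Nat):Int) by push_cast at h2 ⊢; omega)]
        · rw [if_neg h2,
            if_neg (show ¬(49 ≤ c.toNat ∧ (c.toNat : Int) ≤ 48 + ((k+1:Nat):Int)) by push_cast at h2 ⊢; omega)]

-- what a lookup in B's table returns, for any character
theorem pvTableB_get (bs : Int) (hbs : 0 ≤ bs) (c : Char) :
    (pvTableB bs).get? c =
      if c = 'x' then some none
      else if 49 ≤ c.toNat ∧ (c.toNat : Int) ≤ 48 + min bs 9 then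
        some (some ((c.toNat : Int) - 48))
      else none := by
  have h0 : 0 ≤ min bs 9 := le_min hbs (by norm_num)
  have hk : (((min bs 9).toNat : Nat) : Int) = min bs 9 := Int.toNat_of_nonneg h0
  unfold pvTableB
  rw [← hk, tbl _ (by omega), hk]

-- A's inner loop = B's per-line validate-then-translate
theorem pvRowA_eq (bs : Int) (hbs : 0 ≤ bs) (cs : List Char) (acc : List (Option Int)) :
    pvRowA bs cs acc =
      if cs.all (fun c => ((pvTableB bs).get? c).isSome)
      then some (acc ++ cs.map (fun c => ((pvTableB bs).get? c).getD none))
      else none := by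
  induction cs generalizing acc with
  | nil => simp [pvRowA]
  | cons c rest ih =>
    have hl := pvTableB_get bs hbs c
    by_cases hx : c = 'x'
    · subst hx
      rw [if_pos rfl] at hl
      have step : pvRowA bs ('x'::rest) acc = pvRowA bs rest (acc ++ [none]) := by
        simp [pvRowA]
      rw [step, ih, List.all_cons, hl]
      simp only [Option.isSome_some, Bool.true_and, List.map_cons]
      split <;> simp [hl]
    · by_cases hd : PySem.Chars.isdigit c = true
      · have h09 : 48 ≤ c.toNat ∧ c.toNat ≤ 57 := by
          have h := hd; simp [PySem.Chars.isdigit, Char.le_def] at h; exact h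
        by_cases hz : ((c.toNat : Int) - 48 = 0 ∨ (c.toNat : Int) - 48 > bs)
        · have hln : (pvTableB bs).get? c = none := by
            rw [hl, if_neg hx, if_neg (by omega)]
          simp [pvRowA, hx, hd, hz, hln]
        · have hls : (pvTableB bs).get? c = some (some ((c.toNat:Int) - 48)) := by
            rw [hl, if_neg hx, if_pos (by omega)]
          simp only [pvRowA, if_neg hx, hd, if_true, if_neg hz, ih, List.all_cons, hls,
            Option.isSome_some, Bool.true_and, List.map_cons, Option.getD_some]
          split <;> simp
      · have h09' : ¬(48 ≤ c.toNat ∧ c.toNat ≤ 57) := by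
          intro h; apply hd; simp [PySem.Chars.isdigit, Char.le_def]; exact h
        have hln : (pvTableB bs).get? c = none := by
          rw [hl, if_neg hx, if_neg (by omega)]
        simp [pvRowA, hx, hd, hln]

-- A's outer loop = B's validate-then-translate over the lines
theorem pvBoardA_eq (bs : Int) (hbs : 0 ≤ bs) (lines : List String) (acc : List (List (Option Int))) :
    pvBoardA bs lines acc =
      if lines.all (fun l => l.toList.all (fun c => ((pvTableB bs).get? c).isSome))
      then some (acc ++ lines.map (fun l => l.toList.map (fun c => ((pvTableB bs).get? c).getD none)))
      else none := by
  induction lines generalizing acc with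
  | nil => simp [pvBoardA]
  | cons l rest ih =>
    rw [pvBoardA, pvRowA_eq bs hbs]
    by_cases h : (l.toList.all fun c => ((pvTableB bs).get? c).isSome) = true
    · rw [if_pos h]
      simp only [ih, List.all_cons, h, Bool.true_and, List.map_cons]
      split <;> simp
    · rw [if_neg h]
      simp [List.all_cons, h]

-- ===== VERDICT (by name: the statement is the Claim_ definition above) =====
theorem parse_valid_board_py_spec : Claim_equal_parse_valid_board_py := by
  intro ls _ _
  unfold Spec_parse_valid_board_py parse_valid_board_py parse_valid_board_py_alt
  cases h : PySem.List.pyGet? ls 0 with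
  | none => rfl
  | some l0 =>
    dsimp only
    rw [pvBoardA_eq _ (Int.natCast_nonneg _) ls []]
    simp only [PySem.Dict.contains_eq_isSome_get?, List.nil_append]
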